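-- pv_equiv track=rewrite | github.com/mikibakaiki/python-2048-game | app.py | merge_line_left
-- ===== SOURCE A (Python) =====
-- BOARD_SIZE = 4
--
-- def merge_line_left(line: list[int]) -> tuple[list[int], int]:
--     values = [value for value in line if value != 0]
--     merged: list[int] = []
--     gained_score = 0
--     index = 0
--
--     while index < len(values):
--         current = values[index]
--         if index + 1 < len(values) and values[index + 1] == current:
--             current *= 2
--             gained_score += current
--             index += 2
--         else:
--             index += 1
--         merged.append(current)
--
--     merged.extend([0] * (BOARD_SIZE - len(merged)))
--     return merged, gained_score
-- ===== SOURCE B (Python) =====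
-- BOARD_SIZE = 4
--
-- def merge_line_left(line: list[int]) -> tuple[list[int], int]:
--     values = [value for value in line if value != 0]
--     merged: list[int] = []
--     gained_score = 0
--     locked = False
--
--     for v in values:
--         if merged and not locked and merged[-1] == v:
--             merged[-1] *= 2
--             gained_score += merged[-1]
--             locked = True
--         else:
--             merged.append(v)
--             locked = False
--
--     merged.extend([0] * (BOARD_SIZE - len(merged)))
--     return merged, gained_score
-- ===== Notes on version B (the rewrite author's own statement) =====
-- stated objective: alternative
-- what changed: Replaced the index-jumping while loop (index += 2 after a merge) with a single forward for-loop that merges into the last accumulated cell in place, carrying a 'locked' flag to block double merges.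
import Mathlib
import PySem

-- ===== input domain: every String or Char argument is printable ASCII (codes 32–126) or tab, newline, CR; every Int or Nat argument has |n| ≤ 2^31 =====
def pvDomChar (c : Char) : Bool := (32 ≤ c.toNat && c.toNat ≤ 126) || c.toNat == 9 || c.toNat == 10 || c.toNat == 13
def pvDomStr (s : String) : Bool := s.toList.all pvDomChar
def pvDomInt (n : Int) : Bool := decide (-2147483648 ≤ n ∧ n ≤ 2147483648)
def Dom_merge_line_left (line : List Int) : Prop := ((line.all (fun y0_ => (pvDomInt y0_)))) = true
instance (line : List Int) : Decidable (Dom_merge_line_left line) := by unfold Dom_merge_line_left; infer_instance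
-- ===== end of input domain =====

-- B replaces A's index-jumping while loop with a forward fold merging into the last
-- accumulated cell, guarded by a 'locked' flag; same result, same O(n) cost.

-- ===== PORT A =====
-- A's while loop over `values` with the index+2 jump, as structural recursion on the
-- remaining suffix of `values` (index+2 drops two elements, index+1 drops one).
def mllLoopA : List Int → List Int × Int
  | [] => ([], 0)
  | [a] => ([a], 0)
  | a :: b :: rest =>
    if b = a then
      let r := mllLoopA rest
      (2 * a :: r.1, r.2 + 2 * a)
    else
      let r := mllLoopA (b :: rest)
      (a :: r.1, r.2)

def merge_line_left (line : List Int) : List Int × Int :=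
  let values := line.filter (fun v => v ≠ 0)
  let r := mllLoopA values
  (r.1 ++ List.replicate (4 - r.1.length) 0, r.2)

-- ===== PORT B =====
-- one step of B's for-loop: state = (merged, gained_score, locked)
def mllStepB (st : List Int × Int × Bool) (v : Int) : List Int × Int × Bool :=
  if st.1 ≠ [] ∧ st.2.2 = false ∧ st.1.getLast? = some v then
    (st.1.dropLast ++ [2 * v], st.2.1 + 2 * v, true)
  else
    (st.1 ++ [v], st.2.1, false)

def merge_line_left_alt (line : List Int) : List Int × Int :=
  let values := line.filter (fun v => v ≠ 0)
  let st := values.foldl mllStepB ([], 0, false)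
  (st.1 ++ List.replicate (4 - st.1.length) 0, st.2.1)

-- ===== PRECONDITION & SPEC =====
def Spec_merge_line_left (line : List Int) (out : List Int × Int) : Prop := out = merge_line_left_alt line
instance (line : List Int) (out : List Int × Int) : Decidable (Spec_merge_line_left line out) := by unfold Spec_merge_line_left; infer_instance

-- ===== CLAIM (what is proved, stated in full; the proofs are below) =====
def Claim_equal_merge_line_left : Prop := ∀ (line : List Int), Dom_merge_line_left line → Spec_merge_line_left line (merge_line_left line)

-- ===== LEMMAS AND PROOFS =====

-- From an unlocked state whose merged list ends in `a`, B's fold over vs behaves like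
-- A's loop on (a :: vs): the result is acc ++ (mllLoopA (a::vs)).1 with score s + (mllLoopA (a::vs)).2.
theorem mllFoldUnlocked : ∀ (vs acc : List Int) (a s : Int),
    ((vs.foldl mllStepB (acc ++ [a], s, false)).1,
     (vs.foldl mllStepB (acc ++ [a], s, false)).2.1)
    = (acc ++ (mllLoopA (a :: vs)).1, s + (mllLoopA (a :: vs)).2)
  | [], acc, a, s => by simp [mllLoopA]
  | [b], acc, a, s => by
    by_cases h : b = a
    · subst h
      rw [List.foldl_cons,
        show mllStepB (acc ++ [b], s, false) b = (acc ++ [2 * b], s + 2 * b, true) from by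
          simp [mllStepB]]
      simp [mllLoopA]
    · rw [List.foldl_cons,
        show mllStepB (acc ++ [a], s, false) b = ((acc ++ [a]) ++ [b], s, false) from by
          simp [mllStepB, Ne.symm h]]
      simp [mllLoopA, h]
  | b :: c :: rest', acc, a, s => by
    by_cases h : b = a
    · subst h
      rw [List.foldl_cons,
        show mllStepB (acc ++ [b], s, false) b = (acc ++ [2 * b], s + 2 * b, true) from by
          simp [mllStepB]]
      rw [List.foldl_cons,
        show mllStepB (acc ++ [2 * b], s + 2 * b, true) c
            = ((acc ++ [2 * b]) ++ [c], s + 2 * b, false) from by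
          simp [mllStepB]]
      rw [mllFoldUnlocked rest' (acc ++ [2 * b]) c (s + 2 * b)]
      simp [mllLoopA]
      try ring
    · rw [List.foldl_cons,
        show mllStepB (acc ++ [a], s, false) b = ((acc ++ [a]) ++ [b], s, false) from by
          simp [mllStepB, Ne.symm h]]
      rw [mllFoldUnlocked (c :: rest') (acc ++ [a]) b s]
      simp [mllLoopA, h]

theorem mllFoldInit (vs : List Int) :
    ((vs.foldl mllStepB ([], 0, false)).1, (vs.foldl mllStepB ([], 0, false)).2.1)
    = ((mllLoopA vs).1, (mllLoopA vs).2) := by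
  match vs with
  | [] => simp [mllLoopA]
  | a :: rest =>
    rw [List.foldl_cons,
      show mllStepB ([], 0, false) a = (([] : List Int) ++ [a], (0 : Int), false) from by
        simp [mllStepB]]
    simpa using mllFoldUnlocked rest [] a 0

-- ===== VERDICT (by name: the statement is the Claim_ definition above) =====
theorem merge_line_left_spec : Claim_equal_merge_line_left := by
  intro line _
  unfold Spec_merge_line_left merge_line_left merge_line_left_alt
  have h := mllFoldInit (line.filter (fun v => v ≠ 0))
  injection h with h1 h2
  simp only [h1, h2]
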